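-- pv_equiv track=rewrite | github.com/StepanKorobov/test_task | task1/task1.py | get_result_interval_and_paths
-- ===== SOURCE A (Python) =====
-- from typing import Tuple
--
-- def get_result_interval_and_paths(n, m) -> Tuple[str, str]:
--     """
--     Функция создающая путь по которому двигается интервал длины
--     """
--
--     # Создаём список из чисел от 1 до n
--     numbers_list: list = [i for i in range(1, n + 1)]
--     # Текущий индекс, начинаем с нуля
--     current_index: int = 0
--     # Лист содержащий первые элементы интервалов
--     intervals_list: list = list()
--     # Список содержащий интервалы
--     paths_list: list = list()
--
--     # Используем цикл While, так как заранее не знаем сколько итераций потребуется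
--     while True:
--         # Список интервала
--         new_list: list = list()
--         # Индекс, по которому будем создавать список интервала
--         cur_index = current_index
--         for i in range(m):
--             # Обновляем индекс
--             curr_index: int = (cur_index + i) % len(numbers_list)
--             # Добавляем элемент в список интервалов
--             new_list.append(str(numbers_list[curr_index]))
--
--         paths_list.append("".join(new_list))
--
--         # Добавляем элемент по индексу (получается первый элемент интервала)
--         intervals_list.append(str(numbers_list[current_index]))
--         # Вычисляем индекс первого элемента следующего интервала
--         current_index: int = (current_index + m - 1) % n
--         # Если индекс следующего элемента 0, то прерываем цикл
--         if current_index == 0: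
--             break
--
--     intervals = "".join(intervals_list)
--     paths = ",".join(paths_list)
--
--     return intervals, paths
-- ===== SOURCE B (Python) =====
-- def _gcd(a, b):
--     while b:
--         a, b = b, a % b
--     return a
--
-- def get_result_interval_and_paths(n, m):
--     # Closed form: A's loop visits start indices j*(m-1) % n for j = 0..k-1,
--     # where k = n // gcd(n, (m-1) % n) is the order of (m-1) modulo n.
--     k = n // _gcd(n, (m - 1) % n)
--     starts = [j * (m - 1) % n for j in range(k)]
--     intervals = "".join(str(s + 1) for s in starts)
--     paths = ",".join("".join(str((s + i) % n + 1) for i in range(m)) for s in starts)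
--     return intervals, paths
-- ===== Notes on version B (the rewrite author's own statement) =====
-- stated objective: alternative
-- what changed: B replaces A's unbounded while-loop that follows the (idx+m-1)%n recurrence by a number-theoretic closed form: the loop count is n // gcd(n, m-1) and the start indices are computed directly as j*(m-1) % n, then projected into the two strings.
import Mathlib
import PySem

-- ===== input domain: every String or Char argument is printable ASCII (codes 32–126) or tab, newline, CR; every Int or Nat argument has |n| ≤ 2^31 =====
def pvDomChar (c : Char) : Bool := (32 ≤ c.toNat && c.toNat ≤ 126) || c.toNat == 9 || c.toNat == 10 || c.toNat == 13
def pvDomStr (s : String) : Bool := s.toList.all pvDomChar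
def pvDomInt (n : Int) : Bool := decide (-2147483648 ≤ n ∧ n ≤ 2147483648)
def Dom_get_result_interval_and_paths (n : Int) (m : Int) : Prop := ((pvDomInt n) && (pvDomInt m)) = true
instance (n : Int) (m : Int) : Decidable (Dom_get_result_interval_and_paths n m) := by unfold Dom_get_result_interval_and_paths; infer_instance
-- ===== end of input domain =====

-- B replaces A's unbounded while-loop over the (idx+m-1)%n recurrence by a closed form:
-- the loop count is n // gcd(n, m-1) and the start indices are j*(m-1) % n (objective: alternative).

-- ===== PORT A =====
-- A's while-True loop; fuel n.toNat is a totality guard only (the loop runs n/gcd(n,m-1) ≤ n times for n ≥ 1).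
def pvALoop (n m : Int) (numbers : List Int) : Nat → Int → List String → List String → List String × List String
  | 0, _, accI, accP => (accI, accP)
  | f + 1, current_index, accI, accP =>
    -- inner 'for i in range(m)' building new_list, then the two appends
    let new_list : List String :=
      (PySem.List.pyRange 0 m 1).foldl
        (fun acc i => acc ++ [PySem.Int.toStr
          (PySem.List.pyGetD numbers (PySem.Int.mod (current_index + i) (numbers.length : Int)) 0)]) []
    let accP' := accP ++ [PySem.Str.join "" new_list]
    let accI' := accI ++ [PySem.Int.toStr (PySem.List.pyGetD numbers current_index 0)]
    let next := PySem.Int.mod (current_index + m - 1) n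
    if next = 0 then (accI', accP') else pvALoop n m numbers f next accI' accP'

def get_result_interval_and_paths (n : Int) (m : Int) : String × String :=
  let numbers_list := PySem.List.pyRange 1 (n + 1) 1
  let (intervals_list, paths_list) := pvALoop n m numbers_list n.toNat 0 [] []
  (PySem.Str.join "" intervals_list, PySem.Str.join "," paths_list)

-- ===== PORT B =====
-- termination measure for B's hand-written Euclid loop (|a % b| < |b| for b ≠ 0)
theorem pvModAbsLt (a b : Int) (h : ¬ b = 0) : (PySem.Int.mod a b).natAbs < b.natAbs := by
  rcases lt_trichotomy b 0 with hb | hb | hb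
  · have h1 := PySem.Int.mod_neg_bounds a hb
    omega
  · exact absurd hb h
  · have h1 := PySem.Int.mod_nonneg a hb
    have h2 := PySem.Int.mod_lt a hb
    omega

-- B's helper _gcd: 'while b: a, b = b, a % b; return a'
def pvGcd (a b : Int) : Int :=
  if h : b = 0 then a else pvGcd b (PySem.Int.mod a b)
termination_by b.natAbs
decreasing_by exact pvModAbsLt a b h

def get_result_interval_and_paths_alt (n : Int) (m : Int) : String × String :=
  let k := PySem.Int.floordiv n (pvGcd n (PySem.Int.mod (m - 1) n))
  let starts := (PySem.List.pyRange 0 k 1).map (fun j => PySem.Int.mod (j * (m - 1)) n)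
  (PySem.Str.join "" (starts.map (fun s => PySem.Int.toStr (s + 1))),
   PySem.Str.join "," (starts.map (fun s =>
     PySem.Str.join "" ((PySem.List.pyRange 0 m 1).map
       (fun i => PySem.Int.toStr (PySem.Int.mod (s + i) n + 1))))))

-- ===== PRECONDITION & SPEC =====
-- Python A raises (ZeroDivisionError or IndexError) for every n ≤ 0; Pre_ excludes exactly those.
def Pre_get_result_interval_and_paths (n : Int) (m : Int) : Prop := 1 ≤ n
instance (n : Int) (m : Int) : Decidable (Pre_get_result_interval_and_paths n m) := by unfold Pre_get_result_interval_and_paths; infer_instance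
def pvWitness_get_result_interval_and_paths : Int × Int := (5, 3)
def Spec_get_result_interval_and_paths (n : Int) (m : Int) (out : String × String) : Prop := out = get_result_interval_and_paths_alt n m
instance (n : Int) (m : Int) (out : String × String) : Decidable (Spec_get_result_interval_and_paths n m out) := by unfold Spec_get_result_interval_and_paths; infer_instance

-- ===== CLAIM (what is proved, stated in full; the proofs are below) =====
def Claim_equal_get_result_interval_and_paths : Prop := ∀ (n : Int) (m : Int), Dom_get_result_interval_and_paths n m → Pre_get_result_interval_and_paths n m → Spec_get_result_interval_and_paths n m (get_result_interval_and_paths n m)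

-- ===== LEMMAS AND PROOFS =====

-- the start-index sequence A's loop walks through, as a list (proof-only helper)
def pvAStarts (n m : Int) : Nat → Int → List Int
  | 0, _ => []
  | f + 1, idx =>
    idx :: (if PySem.Int.mod (idx + m - 1) n = 0 then []
            else pvAStarts n m f (PySem.Int.mod (idx + m - 1) n))

-- B's per-start path string (proof abbreviation for the lambda in the B port)
def pvPathB (n m : Int) (s : Int) : String :=
  PySem.Str.join "" ((PySem.List.pyRange 0 m 1).map
    (fun i => PySem.Int.toStr (PySem.Int.mod (s + i) n + 1)))

-- the numbers list 1..n read at an in-range index j gives j + 1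
theorem pvNumbers_get (n j : Int) (h0 : 0 ≤ j) (h1 : j < n) :
    PySem.List.pyGetD (PySem.List.pyRange 1 (n + 1) 1) j 0 = j + 1 := by
  rw [PySem.List.pyGetD_of_nonneg _ _ h0, List.getD_eq_getElem?_getD,
    PySem.List.getElem?_pyRange_one]
  rw [if_pos (by omega)]
  simp; omega

-- A's inner path loop equals B's projection, at an in-range start
theorem pvPathEq (n m s : Int) (hn : 0 < n) :
    PySem.Str.join "" ((PySem.List.pyRange 0 m 1).foldl
      (fun acc i => acc ++ [PySem.Int.toStr
        (PySem.List.pyGetD (PySem.List.pyRange 1 (n + 1) 1)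
          (PySem.Int.mod (s + i) ((PySem.List.pyRange 1 (n + 1) 1).length : Int)) 0)]) [])
      = pvPathB n m s := by
  rw [PySem.List.foldl_append_singleton_eq_map]
  unfold pvPathB
  congr 1
  apply List.map_congr_left
  intro i _
  have hlen : ((PySem.List.pyRange 1 (n + 1) 1).length : Int) = n := by
    rw [PySem.List.length_pyRange_one]; omega
  rw [hlen, pvNumbers_get n _ (PySem.Int.mod_nonneg _ hn) (PySem.Int.mod_lt _ hn)]

-- A's combined loop is the start list mapped through B's two projections
theorem pvLoopEq (n m : Int) (hn : 0 < n) (f : Nat) : ∀ (idx : Int), 0 ≤ idx → idx < n →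
    ∀ (accI accP : List String),
    pvALoop n m (PySem.List.pyRange 1 (n + 1) 1) f idx accI accP
      = (accI ++ (pvAStarts n m f idx).map (fun s => PySem.Int.toStr (s + 1)),
         accP ++ (pvAStarts n m f idx).map (pvPathB n m)) := by
  induction f with
  | zero => intro idx _ _ accI accP; simp [pvALoop, pvAStarts]
  | succ f ih =>
    intro idx h0 h1 accI accP
    simp only [pvALoop, pvAStarts]
    by_cases h : PySem.Int.mod (idx + m - 1) n = 0
    · simp only [h, if_pos]
      rw [pvPathEq n m idx hn, pvNumbers_get n idx h0 h1]
      simp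
    · simp only [h, if_false]
      rw [ih _ (PySem.Int.mod_nonneg _ hn) (PySem.Int.mod_lt _ hn)]
      rw [pvPathEq n m idx hn, pvNumbers_get n idx h0 h1]
      simp

-- B's _gcd computes Nat.gcd on nonnegative arguments
theorem pvGcd_eq (K : Nat) : ∀ (a b : Int), b.natAbs ≤ K → 0 ≤ a → 0 ≤ b →
    pvGcd a b = (Nat.gcd a.toNat b.toNat : Int) := by
  induction K with
  | zero =>
    intro a b hK ha hb
    have hb0 : b = 0 := by omega
    subst hb0
    rw [pvGcd]
    simp [Int.toNat_of_nonneg ha]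
  | succ K ih =>
    intro a b hK ha hb
    rw [pvGcd]
    by_cases hb0 : b = 0
    · subst hb0; simp [Int.toNat_of_nonneg ha]
    · rw [dif_neg hb0]
      have hbpos : 0 < b := by omega
      have hmodeq : PySem.Int.mod a b = a % b := PySem.Int.mod_eq_emod_of_pos hbpos
      have hmn : 0 ≤ a % b := Int.emod_nonneg a hb0
      have hdec := pvModAbsLt a b hb0
      rw [ih b (PySem.Int.mod a b) (by omega) (le_of_lt hbpos)
        (by rw [hmodeq]; exact hmn)]
      have hcast : (PySem.Int.mod a b).toNat = a.toNat % b.toNat := by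
        rw [hmodeq]
        conv_lhs => rw [← Int.toNat_of_nonneg ha, ← Int.toNat_of_nonneg (le_of_lt hbpos)]
        rw [← Int.natCast_mod, Int.toNat_natCast]
      rw [hcast, Nat.gcd_comm b.toNat, ← Nat.gcd_rec, Nat.gcd_comm]

-- the j-th start index
def pvS (n m : Int) (j : Nat) : Int := PySem.Int.mod ((j : Int) * (m - 1)) n

theorem pvS_step (n m : Int) (hn : 0 < n) (j : Nat) :
    PySem.Int.mod (pvS n m j + m - 1) n = pvS n m (j + 1) := by
  unfold pvS
  rw [PySem.Int.mod_eq_emod_of_pos hn, PySem.Int.mod_eq_emod_of_pos hn,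
    PySem.Int.mod_eq_emod_of_pos hn]
  have : (j : Int) * (m - 1) % n + m - 1 = ((j : Int) * (m - 1) % n + (m - 1)) := by ring
  rw [this, Int.emod_add_emod]
  congr 1
  push_cast
  ring

-- divisibility characterisation: N ∣ j*C ↔ (N / gcd N C) ∣ j (over Nat, N > 0)
theorem pvOrderDvd (N C : Nat) (hN : 0 < N) (j : Nat) :
    N ∣ j * C ↔ (N / Nat.gcd N C) ∣ j := by
  set g := Nat.gcd N C with hg
  have hgpos : 0 < g := Nat.gcd_pos_of_pos_left C hN
  have hgN : g ∣ N := Nat.gcd_dvd_left N C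
  have hgC : g ∣ C := Nat.gcd_dvd_right N C
  have hcop : Nat.Coprime (N / g) (C / g) := Nat.coprime_div_gcd_div_gcd hgpos
  constructor
  · rintro ⟨t, ht⟩
    have hjC' : j * (C / g) = (N / g) * t := by
      apply Nat.eq_of_mul_eq_mul_right hgpos
      calc j * (C / g) * g = j * (C / g * g) := by ring
        _ = j * C := by rw [Nat.div_mul_cancel hgC]
        _ = N * t := ht
        _ = N / g * g * t := by rw [Nat.div_mul_cancel hgN]
        _ = N / g * t * g := by ring
    exact hcop.dvd_of_dvd_mul_right ⟨t, hjC'⟩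
  · rintro ⟨u, hu⟩
    exact ⟨u * (C / g), by
      calc j * C = (N / g) * u * C := by rw [hu]
        _ = (N / g) * u * (C / g * g) := by rw [Nat.div_mul_cancel hgC]
        _ = (N / g * g) * (u * (C / g)) := by ring
        _ = N * (u * (C / g)) := by rw [Nat.div_mul_cancel hgN]⟩

-- pvS vanishes exactly at multiples of k = N / gcd(N, C), where C = ((m-1) % n).toNat
theorem pvS_zero_iff (n m : Int) (hn : 0 < n) (j : Nat) :
    pvS n m j = 0 ↔ (n.toNat / Nat.gcd n.toNat ((m - 1) % n).toNat) ∣ j := by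
  set r : Int := (m - 1) % n with hr
  have hr0 : 0 ≤ r := Int.emod_nonneg _ (by omega)
  have hrn : r < n := Int.emod_lt_of_pos _ hn
  unfold pvS
  rw [PySem.Int.mod_eq_zero_iff_dvd]
  have hstep1 : n ∣ (j : Int) * (m - 1) ↔ n ∣ (j : Int) * r := by
    have hd : n ∣ (j : Int) * (m - 1) - (j : Int) * r := by
      have h1 : (j : Int) * (m - 1) - (j : Int) * r = (j : Int) * ((m - 1) - r) := by ring
      have h2 : (m - 1) - r = n * ((m - 1) / n) := by rw [hr, Int.emod_def]; ring
      rw [h1, h2]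
      exact Dvd.dvd.mul_left (dvd_mul_right n _) _
    constructor
    · intro h; have := Int.dvd_sub h hd; simpa using this
    · intro h; have := Int.dvd_add h hd; simpa using this
  rw [hstep1]
  have hcast : n ∣ (j : Int) * r ↔ n.toNat ∣ j * r.toNat := by
    constructor
    · intro h
      have h2 := Int.natAbs_dvd_natAbs.mpr h
      simp only [Int.natAbs_mul, Int.natAbs_natCast] at h2
      have e1 : n.natAbs = n.toNat := by omega
      have e2 : r.natAbs = r.toNat := by omega
      rwa [e1, e2] at h2
    · intro h
      have h2 := Int.natCast_dvd_natCast.mpr h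
      push_cast at h2
      rwa [Int.toNat_of_nonneg (le_of_lt hn), Int.toNat_of_nonneg hr0] at h2
  rw [hcast]
  exact pvOrderDvd n.toNat r.toNat (by omega) j

-- A's start list from pvS j, with enough fuel, is the arithmetic progression up to k
theorem pvAStarts_eq (n m : Int) (hn : 0 < n) :
    ∀ (f : Nat) (j : Nat), j < (n.toNat / Nat.gcd n.toNat ((m - 1) % n).toNat) →
      (n.toNat / Nat.gcd n.toNat ((m - 1) % n).toNat) - j ≤ f →
    pvAStarts n m f (pvS n m j)
      = (List.range ((n.toNat / Nat.gcd n.toNat ((m - 1) % n).toNat) - j)).map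
          (fun t => pvS n m (j + t)) := by
  intro f
  set k := n.toNat / Nat.gcd n.toNat ((m - 1) % n).toNat with hk
  induction f with
  | zero => intro j hj hf; omega
  | succ f ih =>
    intro j hj hf
    simp only [pvAStarts]
    rw [pvS_step n m hn j]
    by_cases hz : pvS n m (j + 1) = 0
    · rw [if_pos hz]
      have hdvd : k ∣ (j + 1) := (pvS_zero_iff n m hn (j + 1)).mp hz
      have hle : k ≤ j + 1 := Nat.le_of_dvd (by omega) hdvd
      have hjk : j + 1 = k := by omega
      have h1 : k - j = 1 := by omega
      rw [h1]
      simp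
    · rw [if_neg hz]
      have hnd : ¬ k ∣ (j + 1) := fun h => hz ((pvS_zero_iff n m hn (j + 1)).mpr h)
      have hjk : j + 1 < k := by
        rcases Nat.lt_or_ge (j + 1) k with h | h
        · exact h
        · have : j + 1 = k := by omega
          exact absurd (this ▸ dvd_refl k) hnd
      rw [ih (j + 1) hjk (by omega)]
      have h2 : k - j = (k - (j + 1)) + 1 := by omega
      rw [h2, List.range_succ_eq_map]
      simp only [List.map_cons, List.map_map]
      congr 1
      apply List.map_congr_left
      intro t _
      simp only [Function.comp_apply, Nat.succ_eq_add_one]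
      congr 1
      omega

-- ===== VERDICT (by name: the statement is the Claim_ definition above) =====
-- arithmetic bookkeeping for the final assembly
theorem pvS_zero (n m : Int) (hn : 0 < n) : pvS n m 0 = 0 := by
  unfold pvS
  rw [PySem.Int.mod_eq_emod_of_pos hn]
  simp

theorem get_result_interval_and_paths_spec : Claim_equal_get_result_interval_and_paths := by
  intro n m _ hpre
  have hn : 0 < n := hpre
  show get_result_interval_and_paths n m = get_result_interval_and_paths_alt n m
  have hNpos : 0 < n.toNat := by omega
  have hr0 : 0 ≤ (m - 1) % n := Int.emod_nonneg _ (by omega)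
  have hrn : (m - 1) % n < n := Int.emod_lt_of_pos _ hn
  set g := Nat.gcd n.toNat ((m - 1) % n).toNat with hg
  have hgpos : 0 < g := Nat.gcd_pos_of_pos_left _ hNpos
  set k := n.toNat / g with hk
  have hkpos : 0 < k := Nat.div_pos (Nat.le_of_dvd hNpos (Nat.gcd_dvd_left _ _)) hgpos
  have hkle : k ≤ n.toNat := Nat.div_le_self _ _
  -- A side
  rw [get_result_interval_and_paths]
  rw [pvLoopEq n m hn n.toNat 0 le_rfl (by omega) [] []]
  rw [show (0 : Int) = pvS n m 0 from (pvS_zero n m hn).symm]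
  rw [pvAStarts_eq n m hn n.toNat 0 hkpos (by omega)]
  -- B side
  rw [get_result_interval_and_paths_alt]
  have hmod : PySem.Int.mod (m - 1) n = (m - 1) % n := PySem.Int.mod_eq_emod_of_pos hn
  have hgcd : pvGcd n (PySem.Int.mod (m - 1) n) = (g : Int) := by
    rw [hmod, pvGcd_eq n.natAbs n ((m - 1) % n) (by omega) (by omega) hr0, hg]
  have hfd : PySem.Int.floordiv n (pvGcd n (PySem.Int.mod (m - 1) n)) = (k : Int) := by
    rw [hgcd, PySem.Int.floordiv_eq_ediv_of_pos (by exact_mod_cast hgpos)]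
    rw [hk, Int.natCast_ediv]
    congr 1
    omega
  rw [hfd]
  have hrange : PySem.List.pyRange 0 (k : Int) 1
      = (List.range k).map (fun t => ((t : Nat) : Int)) := by
    rw [PySem.List.pyRange_one]
    simp
  rw [hrange]
  simp only [List.map_map, Function.comp_def, Nat.sub_zero, Nat.zero_add, pvPathB, pvS]
  simp only [List.nil_append, ← hg, ← hk]
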